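-- pv_equiv track=rewrite | github.com/Shuniy/Codes | Reboot/Dynamic Programming/CountSubsetsWithGivenDifference.py | CountSubsetsWithGivenDifferenceRecursionHelper
-- ===== SOURCE A (Python) =====
-- def CountSubsetsWithGivenDifferenceRecursionHelper(arr: list[int], difference: int, subset1Sum: int, subset2Sum: int, index: int, count: int) -> int:
--     if index >= len(arr):
--         if abs(subset1Sum - subset2Sum) == difference:
--             count += 1
--         return count
--
--     count = CountSubsetsWithGivenDifferenceRecursionHelper(
--         arr, difference, subset1Sum + arr[index], subset2Sum - arr[index], index + 1, count)
--     count = CountSubsetsWithGivenDifferenceRecursionHelper(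
--         arr, difference, subset1Sum, subset2Sum, index + 1, count)
--     return count
-- ===== SOURCE B (Python) =====
-- def CountSubsetsWithGivenDifferenceRecursionHelper(arr: list[int], difference: int, subset1Sum: int, subset2Sum: int, index: int, count: int) -> int:
--     # Iterative subset-sum enumeration: each remaining element either moves to
--     # subset1 (shifting the signed difference by 2*arr[i]) or stays; collect all
--     # achievable shifts, then count the ones matching |base + shift| == difference.
--     totals = [0]
--     for i in range(index, len(arr)):
--         totals = totals + [t + 2 * arr[i] for t in totals]
--     base = subset1Sum - subset2Sum
--     return count + sum(1 for t in totals if abs(base + t) == difference)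
-- ===== Notes on version B (the rewrite author's own statement) =====
-- stated objective: alternative
-- what changed: Replaces the depth-first recursion that threads a count accumulator through 2^k calls with an iterative pass that builds the list of achievable signed-sum shifts (2*element per chosen item) and then counts those matching |base + shift| == difference.
import Mathlib
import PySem

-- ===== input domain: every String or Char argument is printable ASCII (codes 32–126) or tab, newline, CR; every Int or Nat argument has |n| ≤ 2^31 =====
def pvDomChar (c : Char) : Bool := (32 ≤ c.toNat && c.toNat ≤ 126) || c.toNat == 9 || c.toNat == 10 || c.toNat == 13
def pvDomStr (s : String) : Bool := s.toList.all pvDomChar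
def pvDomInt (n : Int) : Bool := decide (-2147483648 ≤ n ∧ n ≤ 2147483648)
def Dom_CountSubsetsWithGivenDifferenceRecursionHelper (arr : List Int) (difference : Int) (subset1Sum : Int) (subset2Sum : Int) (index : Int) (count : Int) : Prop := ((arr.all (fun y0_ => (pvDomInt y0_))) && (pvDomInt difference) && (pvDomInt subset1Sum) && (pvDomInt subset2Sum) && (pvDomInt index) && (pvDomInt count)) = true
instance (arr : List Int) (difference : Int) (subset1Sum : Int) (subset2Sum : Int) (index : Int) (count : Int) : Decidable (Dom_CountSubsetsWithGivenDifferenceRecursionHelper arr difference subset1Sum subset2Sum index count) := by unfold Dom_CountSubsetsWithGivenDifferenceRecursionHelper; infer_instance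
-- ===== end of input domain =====

-- B replaces the depth-first recursion (which threads an accumulator through 2^k calls)
-- by an iterative pass that builds the list of achievable signed-sum shifts and then
-- counts the matching ones (objective: alternative algorithm of the same cost).

-- ===== PORT A =====
def CountSubsetsWithGivenDifferenceRecursionHelper (arr : List Int) (difference : Int) (subset1Sum : Int) (subset2Sum : Int) (index : Int) (count : Int) : Int :=
  if (arr.length : Int) ≤ index then
    if |subset1Sum - subset2Sum| = difference then count + 1 else count
  else
    -- arr[index]: pyGetD is exact under Pre_ (Raise.InRange arr.length index)
    let a := PySem.List.pyGetD arr index 0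
    let count1 := CountSubsetsWithGivenDifferenceRecursionHelper arr difference (subset1Sum + a) (subset2Sum - a) (index + 1) count
    CountSubsetsWithGivenDifferenceRecursionHelper arr difference subset1Sum subset2Sum (index + 1) count1
termination_by ((arr.length : Int) - index).toNat
decreasing_by all_goals omega

-- ===== PORT B =====
def CountSubsetsWithGivenDifferenceRecursionHelper_alt (arr : List Int) (difference : Int) (subset1Sum : Int) (subset2Sum : Int) (index : Int) (count : Int) : Int :=
  let totals := (PySem.List.pyRange index (arr.length : Int) 1).foldl
    (fun ts i => ts ++ ts.map (fun t => t + 2 * PySem.List.pyGetD arr i 0)) [0]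
  let base := subset1Sum - subset2Sum
  count + (totals.map (fun t => if |base + t| = difference then (1 : Int) else 0)).sum

-- ===== PRECONDITION & SPEC =====
-- Pre_ excludes exactly the inputs where Python A raises IndexError (index below
-- -len(arr) while the loop region range(index, len(arr)) is nonempty); B raises there too.
def Pre_CountSubsetsWithGivenDifferenceRecursionHelper (arr : List Int) (difference : Int) (subset1Sum : Int) (subset2Sum : Int) (index : Int) (count : Int) : Prop :=
  0 ≤ index ∨ (arr ≠ [] ∧ -(arr.length : Int) ≤ index)
instance (arr : List Int) (difference : Int) (subset1Sum : Int) (subset2Sum : Int) (index : Int) (count : Int) : Decidable (Pre_CountSubsetsWithGivenDifferenceRecursionHelper arr difference subset1Sum subset2Sum index count) := by unfold Pre_CountSubsetsWithGivenDifferenceRecursionHelper; infer_instance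

def pvWitness_CountSubsetsWithGivenDifferenceRecursionHelper : List Int × Int × Int × Int × Int × Int := ([1, 1, 2], 2, 0, 0, 0, 0)

def Spec_CountSubsetsWithGivenDifferenceRecursionHelper (arr : List Int) (difference : Int) (subset1Sum : Int) (subset2Sum : Int) (index : Int) (count : Int) (out : Int) : Prop := out = CountSubsetsWithGivenDifferenceRecursionHelper_alt arr difference subset1Sum subset2Sum index count
instance (arr : List Int) (difference : Int) (subset1Sum : Int) (subset2Sum : Int) (index : Int) (count : Int) (out : Int) : Decidable (Spec_CountSubsetsWithGivenDifferenceRecursionHelper arr difference subset1Sum subset2Sum index count out) := by unfold Spec_CountSubsetsWithGivenDifferenceRecursionHelper; infer_instance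

-- ===== CLAIM (what is proved, stated in full; the proofs are below) =====
def Claim_equal_CountSubsetsWithGivenDifferenceRecursionHelper : Prop := ∀ (arr : List Int) (difference : Int) (subset1Sum : Int) (subset2Sum : Int) (index : Int) (count : Int), Dom_CountSubsetsWithGivenDifferenceRecursionHelper arr difference subset1Sum subset2Sum index count → Pre_CountSubsetsWithGivenDifferenceRecursionHelper arr difference subset1Sum subset2Sum index count → Spec_CountSubsetsWithGivenDifferenceRecursionHelper arr difference subset1Sum subset2Sum index count (CountSubsetsWithGivenDifferenceRecursionHelper arr difference subset1Sum subset2Sum index count)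

-- ===== LEMMAS AND PROOFS =====

-- number of subsets of `vs` whose doubled sum `t` satisfies |base + t| = d
def pvCountWays (d : Int) (base : Int) : List Int → Int
  | [] => if |base| = d then 1 else 0
  | a :: rest => pvCountWays d (base + 2 * a) rest + pvCountWays d base rest

-- A adds pvCountWays over the elements it visits (arr[i] for i in range(index, len(arr))) to count
lemma pvA_char (arr : List Int) (d s1 s2 index count : Int) :
    CountSubsetsWithGivenDifferenceRecursionHelper arr d s1 s2 index count
      = count + pvCountWays d (s1 - s2)
          ((PySem.List.pyRange index (arr.length : Int) 1).map (fun i => PySem.List.pyGetD arr i 0)) := by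
  by_cases h : (arr.length : Int) ≤ index
  · rw [CountSubsetsWithGivenDifferenceRecursionHelper,
      PySem.List.pyRange_one_eq_nil h]
    simp only [if_pos h, List.map_nil, pvCountWays]
    split_ifs <;> omega
  · rw [CountSubsetsWithGivenDifferenceRecursionHelper]
    rw [if_neg h, PySem.List.pyRange_one_cons (by omega)]
    dsimp only
    rw [pvA_char arr d (s1 + PySem.List.pyGetD arr index 0) (s2 - PySem.List.pyGetD arr index 0) (index + 1) count]
    rw [pvA_char arr d s1 s2 (index + 1)]
    simp only [List.map_cons, pvCountWays]
    ring_nf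
termination_by ((arr.length : Int) - index).toNat
decreasing_by all_goals omega

-- the iterative doubling pass counts the same thing, for any seed list of shifts
lemma pvB_key (arr : List Int) (d base : Int) : ∀ (idxs ts : List Int),
    ((idxs.foldl (fun ts i => ts ++ ts.map (fun t => t + 2 * PySem.List.pyGetD arr i 0)) ts).map
        (fun t => if |base + t| = d then (1 : Int) else 0)).sum
      = (ts.map (fun t => pvCountWays d (base + t) (idxs.map (fun i => PySem.List.pyGetD arr i 0)))).sum := by
  intro idxs
  induction idxs with
  | nil =>
    intro ts
    simp only [List.foldl_nil, List.map_nil, pvCountWays]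
  | cons i rest ih =>
    intro ts
    simp only [List.foldl_cons]
    rw [ih (ts ++ ts.map (fun t => t + 2 * PySem.List.pyGetD arr i 0))]
    simp only [List.map_append, List.sum_append, List.map_map, Function.comp_def,
      List.map_cons, pvCountWays]
    rw [PySem.List.sum_map_add_int]
    simp only [add_assoc, add_comm]

lemma pvB_char (arr : List Int) (d s1 s2 index count : Int) :
    CountSubsetsWithGivenDifferenceRecursionHelper_alt arr d s1 s2 index count
      = count + pvCountWays d (s1 - s2)
          ((PySem.List.pyRange index (arr.length : Int) 1).map (fun i => PySem.List.pyGetD arr i 0)) := by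
  unfold CountSubsetsWithGivenDifferenceRecursionHelper_alt
  dsimp only
  rw [pvB_key arr d (s1 - s2) (PySem.List.pyRange index (arr.length : Int) 1) [0]]
  simp

-- ===== VERDICT (by name: the statement is the Claim_ definition above) =====
theorem CountSubsetsWithGivenDifferenceRecursionHelper_spec : Claim_equal_CountSubsetsWithGivenDifferenceRecursionHelper := by
  intro arr d s1 s2 index count _ _
  unfold Spec_CountSubsetsWithGivenDifferenceRecursionHelper
  rw [pvA_char, pvB_char]
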